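-- pv_equiv track=rewrite | github.com/SamuelSchlesinger/erdos-problems | scripts/gadget_mine.py | find_triples
-- ===== SOURCE A (Python) =====
-- def find_triples(M):
--     """Find all (a,b,c) with 1 ≤ a < b < c ≤ M satisfying 1/a = 1/b + 1/c,
--     i.e. a*(b+c) = b*c, i.e. (b-a)*(c-a) = a²."""
--     triples = []
--     for a in range(1, M + 1):
--         a2 = a * a
--         # (b-a)*(c-a) = a², so enumerate divisors of a²
--         for d1 in range(1, a2 + 1):
--             if a2 % d1 != 0:
--                 continue
--             d2 = a2 // d1
--             b = a + d1
--             c = a + d2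
--             if b < c and c <= M:
--                 triples.append((a, b, c))
--     return triples
-- ===== SOURCE B (Python) =====
-- def find_triples(M):
--     """Find all (a,b,c) with 1 <= a < b < c <= M satisfying 1/a = 1/b + 1/c.
--
--     With d = b - a we need d*(c-a) = a*a and d < c-a, which forces d < a,
--     so only divisors d of a*a with 1 <= d < a matter (b < c is automatic):
--     O(M^2) work instead of A's O(M^3) scan of all candidates up to a*a."""
--     return [(a, a + d, a + a * a // d)
--             for a in range(1, M + 1)
--             for d in range(1, a)
--             if a * a % d == 0 and a + a * a // d <= M]
-- ===== Notes on version B (the rewrite author's own statement) =====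
-- stated objective: faster
-- what changed: B builds the list by a comprehension that enumerates only the small divisor d = b-a of a*a with 1 <= d < a (b < c forces d < a, so that comparison disappears), instead of A's accumulator loop scanning every candidate up to a*a; output order is unchanged.
import Mathlib
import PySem

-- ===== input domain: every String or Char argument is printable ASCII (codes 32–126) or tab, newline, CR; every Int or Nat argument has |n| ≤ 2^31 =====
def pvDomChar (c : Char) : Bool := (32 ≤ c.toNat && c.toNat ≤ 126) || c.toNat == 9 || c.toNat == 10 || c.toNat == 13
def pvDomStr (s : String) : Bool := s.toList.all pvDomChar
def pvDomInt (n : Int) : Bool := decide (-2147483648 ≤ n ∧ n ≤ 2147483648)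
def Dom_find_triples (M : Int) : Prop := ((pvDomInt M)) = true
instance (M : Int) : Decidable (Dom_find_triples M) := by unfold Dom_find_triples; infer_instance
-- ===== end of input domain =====

-- B is a comprehension over only the small divisors d = b-a < a of a² (b < c forces d < a): O(M²) instead of A's O(M³); same output order.

-- ===== PORT A =====
def find_triples (M : Int) : List (Int × Int × Int) :=
  (PySem.List.pyRange 1 (M + 1) 1).foldl (fun triples a =>
    let a2 := a * a
    (PySem.List.pyRange 1 (a2 + 1) 1).foldl (fun triples d1 =>
      if PySem.Int.mod a2 d1 ≠ 0 then triples
      else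
        let d2 := PySem.Int.floordiv a2 d1
        let b := a + d1
        let c := a + d2
        if b < c ∧ c ≤ M then triples ++ [(a, b, c)] else triples) triples) []

-- ===== PORT B =====
def find_triples_alt (M : Int) : List (Int × Int × Int) :=
  (PySem.List.pyRange 1 (M + 1) 1).flatMap (fun a =>
    ((PySem.List.pyRange 1 a 1).filter (fun d =>
      decide (PySem.Int.mod (a * a) d = 0 ∧ a + PySem.Int.floordiv (a * a) d ≤ M))).map
      (fun d => (a, a + d, a + PySem.Int.floordiv (a * a) d)))

-- ===== PRECONDITION & SPEC =====
def Spec_find_triples (M : Int) (out : List (Int × Int × Int)) : Prop := out = find_triples_alt M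
instance (M : Int) (out : List (Int × Int × Int)) : Decidable (Spec_find_triples M out) := by unfold Spec_find_triples; infer_instance

-- ===== CLAIM (what is proved, stated in full; the proofs are below) =====
def Claim_equal_find_triples : Prop := ∀ (M : Int), Dom_find_triples M → Spec_find_triples M (find_triples M)

-- ===== LEMMAS AND PROOFS =====

-- A's inner-loop test and the produced triple
def pvPA (M a d : Int) : Bool :=
  decide (PySem.Int.mod (a*a) d = 0 ∧
    (a + d < a + PySem.Int.floordiv (a*a) d ∧ a + PySem.Int.floordiv (a*a) d ≤ M))

def pvPB (M a d : Int) : Bool :=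
  decide (PySem.Int.mod (a*a) d = 0 ∧ a + PySem.Int.floordiv (a*a) d ≤ M)

def pvG (a d : Int) : Int × Int × Int := (a, a + d, a + PySem.Int.floordiv (a*a) d)

theorem pvInnerA (M a : Int) (acc : List (Int × Int × Int)) :
    ((PySem.List.pyRange 1 (a*a + 1) 1).foldl (fun triples d1 =>
      if PySem.Int.mod (a*a) d1 ≠ 0 then triples
      else
        let d2 := PySem.Int.floordiv (a*a) d1
        let b := a + d1
        let c := a + d2
        if b < c ∧ c ≤ M then triples ++ [(a, b, c)] else triples) acc)
    = acc ++ ((PySem.List.pyRange 1 (a*a + 1) 1).filter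
        (pvPA M a)).map (pvG a) := by
  have hf : (fun (triples : List (Int × Int × Int)) d1 =>
      if PySem.Int.mod (a*a) d1 ≠ 0 then triples
      else
        let d2 := PySem.Int.floordiv (a*a) d1
        let b := a + d1
        let c := a + d2
        if b < c ∧ c ≤ M then triples ++ [(a, b, c)] else triples)
      = (fun acc x => if pvPA M a x = true then acc ++ [pvG a x] else acc) := by
    funext t d
    by_cases h : PySem.Int.mod (a*a) d = 0 <;>
      simp [pvPA, pvG, h]
  rw [hf]
  exact PySem.List.foldl_append_if (pvPA M a) (pvG a) _ acc

-- divisibility: for 0 < d and a² = d·k, a²//d = the cofactor k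
theorem pvCofactor (a d k : Int) (hd : 0 < d) (hk : a*a = d * k) :
    PySem.Int.floordiv (a*a) d = k := by
  rw [PySem.Int.floordiv_eq_ediv_of_pos hd, hk, Int.mul_ediv_cancel_left _ (by omega)]

-- A's filtered range collapses to B's: past d = a nothing passes, below it the b < c test is automatic
theorem pvFilters (M a : Int) (ha : 1 ≤ a) :
    (PySem.List.pyRange 1 (a*a + 1) 1).filter (pvPA M a)
      = (PySem.List.pyRange 1 a 1).filter (pvPB M a) := by
  rw [PySem.List.pyRange_one_append 1 a (a*a + 1) ha (by nlinarith), List.filter_append]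
  have htail : (PySem.List.pyRange a (a*a + 1) 1).filter (pvPA M a) = [] := by
    apply List.filter_eq_nil_iff.mpr
    intro d hd
    have hmem := (PySem.List.mem_pyRange_one).1 hd
    simp only [pvPA, decide_eq_true_eq, not_and]
    intro hmod hlt _
    obtain ⟨k, hk⟩ := (PySem.Int.mod_eq_zero_iff_dvd _ _).1 hmod
    rw [pvCofactor a d k (by omega) hk] at hlt
    nlinarith
  have hhead : (PySem.List.pyRange 1 a 1).filter (pvPA M a)
      = (PySem.List.pyRange 1 a 1).filter (pvPB M a) := by
    apply List.filter_congr
    intro d hd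
    have hmem := (PySem.List.mem_pyRange_one).1 hd
    simp only [pvPA, pvPB, decide_eq_decide]
    constructor
    · rintro ⟨h1, _, h3⟩; exact ⟨h1, h3⟩
    · rintro ⟨h1, h3⟩
      refine ⟨h1, ?_, h3⟩
      obtain ⟨k, hk⟩ := (PySem.Int.mod_eq_zero_iff_dvd _ _).1 h1
      rw [pvCofactor a d k (by omega) hk]
      nlinarith
  rw [htail, hhead, List.append_nil]

theorem pvFlatMapCongr {α β : Type} (l : List α) (f g : α → List β)
    (h : ∀ x ∈ l, f x = g x) : l.flatMap f = l.flatMap g := by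
  induction l with
  | nil => rfl
  | cons x xs ih =>
    simp only [List.flatMap_cons, h x (List.mem_cons_self), ih (fun y hy => h y (List.mem_cons_of_mem _ hy))]

-- ===== VERDICT (by name: the statement is the Claim_ definition above) =====
theorem find_triples_spec : Claim_equal_find_triples := by
  intro M _
  unfold Spec_find_triples find_triples find_triples_alt
  simp only [pvInnerA]
  rw [PySem.List.foldl_append_eq_flatMap]
  simp only [List.nil_append]
  apply pvFlatMapCongr
  intro a ha
  have hmem := (PySem.List.mem_pyRange_one).1 ha
  rw [pvFilters M a hmem.1]
  rfl
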